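-- pv_equiv track=rewrite | github.com/avoytkiv/speech-to-text-app | app/post_processing_utils.py | map_speakers_and_apply_mapping
-- ===== SOURCE A (Python) =====
-- def map_speakers_and_apply_mapping(gpt_response, speaker_memory):
--     new_speaker_info = []
--     current_mapping = {}
--
--     for line in gpt_response.splitlines():
--         if line.startswith("Speaker"):
--             speaker_id, text = line.split(":", 1)
--             # If the speaker is new, map it to a consistent ID
--             if speaker_id not in speaker_memory:
--                 new_id = f"Speaker {len(speaker_memory) + 1}"
--                 speaker_memory[speaker_id] = new_id
--                 current_mapping[speaker_id] = new_id
--             else: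
--                 current_mapping[speaker_id] = speaker_memory[speaker_id]
--             new_speaker_info.append(f"{current_mapping[speaker_id]}:{text.strip()}")
--
--     # Apply the mapping to the entire current transcription
--     mapped_transcription = "\n".join([f"{current_mapping.get(line.split(':', 1)[0], line.split(':', 1)[0])}:{line.split(':', 1)[1].strip()}" for line in gpt_response.splitlines() if line.startswith("Speaker")])
--
--     return mapped_transcription, new_speaker_info, speaker_memory
-- ===== SOURCE B (Python) =====
-- def map_speakers_and_apply_mapping(gpt_response, speaker_memory):
--     # Single pass: no current_mapping dict and no second join-comprehension pass.
--     # Mutates speaker_memory in place, like the original.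
--     new_speaker_info = []
--     for line in gpt_response.splitlines():
--         if line.startswith("Speaker"):
--             speaker_id, text = line.split(":", 1)
--             if speaker_id not in speaker_memory:
--                 speaker_memory[speaker_id] = f"Speaker {len(speaker_memory) + 1}"
--             new_speaker_info.append(f"{speaker_memory[speaker_id]}:{text.strip()}")
--     return "\n".join(new_speaker_info), new_speaker_info, speaker_memory
-- ===== Notes on version B (the rewrite author's own statement) =====
-- stated objective: simpler
-- what changed: B drops A's current_mapping dict and A's entire second comprehension pass: one loop reads/updates speaker_memory directly and the transcription is just '\n'.join(new_speaker_info), which is provably identical because A's second-pass .get fallback is dead code.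
-- outside the precondition, e.g. on map_speakers_and_apply_mapping('Speaker oops no colon', {}): A raises ValueError, B raises ValueError
import Mathlib
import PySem

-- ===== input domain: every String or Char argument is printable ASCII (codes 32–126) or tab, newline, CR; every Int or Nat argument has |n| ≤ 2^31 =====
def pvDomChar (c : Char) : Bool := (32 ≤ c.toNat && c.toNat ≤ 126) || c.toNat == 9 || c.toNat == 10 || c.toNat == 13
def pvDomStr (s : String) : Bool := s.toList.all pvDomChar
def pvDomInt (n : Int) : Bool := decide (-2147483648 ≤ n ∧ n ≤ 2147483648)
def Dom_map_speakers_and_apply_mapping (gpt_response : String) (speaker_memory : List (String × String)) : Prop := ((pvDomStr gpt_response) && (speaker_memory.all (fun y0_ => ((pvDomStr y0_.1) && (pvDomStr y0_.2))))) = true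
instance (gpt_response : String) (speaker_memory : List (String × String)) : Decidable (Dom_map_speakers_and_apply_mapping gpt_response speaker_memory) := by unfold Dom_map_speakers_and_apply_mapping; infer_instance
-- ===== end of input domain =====

-- B drops A's current_mapping dict and A's second comprehension pass (dead .get fallback): one loop,
-- transcription = "\n".join(new_speaker_info).  Objective: simpler.  Both A and B mutate the
-- speaker_memory dict in place identically; the equivalence proved here is about the return value.

-- ===== PORT A =====
-- the comprehension body of A's second pass:  current_mapping.get(line.split(':',1)[0], …) + ':' + line.split(':',1)[1].strip()
def pvKey (line : String) : String := ((PySem.Str.splitMax? line ":" 1).getD []).getD 0 ""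
def pvText (line : String) : String := ((PySem.Str.splitMax? line ":" 1).getD []).getD 1 ""
def pvRender (cur : PySem.Dict String String) (line : String) : String :=
  ((cur.get? (pvKey line)).getD (pvKey line)) ++ ":" ++ PySem.Str.strip (pvText line)

-- A's loop body over state (new_speaker_info, current_mapping, speaker_memory); the `| _ => st`
-- branch is where Python's `speaker_id, text = line.split(":", 1)` raises ValueError (outside Pre_);
-- the `.getD speaker_id` defaults stand for lookups that cannot miss (the key was just inserted / contains holds).
def pvStepA (st : List String × PySem.Dict String String × PySem.Dict String String) (line : String) :
    List String × PySem.Dict String String × PySem.Dict String String :=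
  if PySem.Str.startswith line "Speaker" then
    match PySem.Str.splitMax? line ":" 1 with
    | some [speaker_id, text] =>
      if st.2.2.contains speaker_id = false then
        let new_id := "Speaker " ++ PySem.Int.toStr ((st.2.2.size : Int) + 1)
        let cur' := st.2.1.insert speaker_id new_id
        (st.1 ++ [((cur'.get? speaker_id).getD speaker_id) ++ ":" ++ PySem.Str.strip text],
         cur', st.2.2.insert speaker_id new_id)
      else
        let v := (st.2.2.get? speaker_id).getD speaker_id
        let cur' := st.2.1.insert speaker_id v
        (st.1 ++ [((cur'.get? speaker_id).getD speaker_id) ++ ":" ++ PySem.Str.strip text],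
         cur', st.2.2)
    | _ => st
  else st

def map_speakers_and_apply_mapping (gpt_response : String) (speaker_memory : List (String × String)) : String × List String × (List (String × String)) :=
  let r := (PySem.Str.splitlines gpt_response).foldl pvStepA
    ([], PySem.Dict.empty, PySem.Dict.ofList speaker_memory)
  let mapped_transcription := PySem.Str.join "\n"
    (((PySem.Str.splitlines gpt_response).filter
        (fun l => PySem.Str.startswith l "Speaker")).map (pvRender r.2.1))
  (mapped_transcription, r.1, r.2.2.items)

-- ===== PORT B =====
-- B's loop body over state (new_speaker_info, speaker_memory)
def pvStepB (st : List String × PySem.Dict String String) (line : String) :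
    List String × PySem.Dict String String :=
  if PySem.Str.startswith line "Speaker" then
    match PySem.Str.splitMax? line ":" 1 with
    | some [speaker_id, text] =>
      let mem' := if st.2.contains speaker_id = false
        then st.2.insert speaker_id ("Speaker " ++ PySem.Int.toStr ((st.2.size : Int) + 1))
        else st.2
      (st.1 ++ [((mem'.get? speaker_id).getD speaker_id) ++ ":" ++ PySem.Str.strip text], mem')
    | _ => st
  else st

def map_speakers_and_apply_mapping_alt (gpt_response : String) (speaker_memory : List (String × String)) : String × List String × (List (String × String)) :=
  let r := (PySem.Str.splitlines gpt_response).foldl pvStepB ([], PySem.Dict.ofList speaker_memory)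
  (PySem.Str.join "\n" r.1, r.1, r.2.items)

-- ===== PRECONDITION & SPEC =====
-- Pre_ excludes inputs where some line starts with "Speaker" but contains no ':' — there
-- `speaker_id, text = line.split(":", 1)` yields one piece and A raises ValueError (B raises too).
def Pre_map_speakers_and_apply_mapping (gpt_response : String) (speaker_memory : List (String × String)) : Prop :=
  ∀ l ∈ PySem.Str.splitlines gpt_response, PySem.Str.startswith l "Speaker" = true →
    ((PySem.Str.splitMax? l ":" 1).getD []).length = 2
instance (gpt_response : String) (speaker_memory : List (String × String)) : Decidable (Pre_map_speakers_and_apply_mapping gpt_response speaker_memory) := by unfold Pre_map_speakers_and_apply_mapping; infer_instance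

def pvWitness_map_speakers_and_apply_mapping : String × (List (String × String)) :=
  ("Speaker A: hi\nSpeaker B: yo\nnote", [("Speaker A", "Speaker 1")])

def Spec_map_speakers_and_apply_mapping (gpt_response : String) (speaker_memory : List (String × String)) (out : String × List String × (List (String × String))) : Prop := out = map_speakers_and_apply_mapping_alt gpt_response speaker_memory
instance (gpt_response : String) (speaker_memory : List (String × String)) (out : String × List String × (List (String × String))) : Decidable (Spec_map_speakers_and_apply_mapping gpt_response speaker_memory out) := by unfold Spec_map_speakers_and_apply_mapping; infer_instance

-- ===== CLAIM (what is proved, stated in full; the proofs are below) =====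
def Claim_equal_map_speakers_and_apply_mapping : Prop := ∀ (gpt_response : String) (speaker_memory : List (String × String)), Dom_map_speakers_and_apply_mapping gpt_response speaker_memory → Pre_map_speakers_and_apply_mapping gpt_response speaker_memory → Spec_map_speakers_and_apply_mapping gpt_response speaker_memory (map_speakers_and_apply_mapping gpt_response speaker_memory)

-- ===== LEMMAS AND PROOFS =====

lemma pvStepA_skip (st : List String × PySem.Dict String String × PySem.Dict String String)
    (l : String) (hs : PySem.Str.startswith l "Speaker" = false) : pvStepA st l = st := by
  have hsC : PySem.Chars.startswith l.toList ['S','p','e','a','k','e','r'] = false := by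
    simpa using hs
  unfold pvStepA; simp [hsC]

lemma pvStepB_skip (st : List String × PySem.Dict String String)
    (l : String) (hs : PySem.Str.startswith l "Speaker" = false) : pvStepB st l = st := by
  have hsC : PySem.Chars.startswith l.toList ['S','p','e','a','k','e','r'] = false := by
    simpa using hs
  unfold pvStepB; simp [hsC]

lemma pvStepA_new (info : List String) (cur mem : PySem.Dict String String)
    (l sid text : String) (hs : PySem.Str.startswith l "Speaker" = true)
    (hsp : PySem.Str.splitMax? l ":" 1 = some [sid, text])
    (hc : mem.contains sid = false) :
    pvStepA (info, cur, mem) l =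
      (info ++ [("Speaker " ++ PySem.Int.toStr ((mem.size : Int) + 1)) ++ ":" ++ PySem.Str.strip text],
       cur.insert sid ("Speaker " ++ PySem.Int.toStr ((mem.size : Int) + 1)),
       mem.insert sid ("Speaker " ++ PySem.Int.toStr ((mem.size : Int) + 1))) := by
  have hsC : PySem.Chars.startswith l.toList ['S','p','e','a','k','e','r'] = true := by
    simpa using hs
  unfold pvStepA; simp [hsC, hsp, hc, PySem.Dict.get?_insert_self]

lemma pvStepA_old (info : List String) (cur mem : PySem.Dict String String)
    (l sid text v : String) (hs : PySem.Str.startswith l "Speaker" = true)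
    (hsp : PySem.Str.splitMax? l ":" 1 = some [sid, text])
    (hv : mem.get? sid = some v) :
    pvStepA (info, cur, mem) l =
      (info ++ [v ++ ":" ++ PySem.Str.strip text], cur.insert sid v, mem) := by
  have hc : mem.contains sid = true := by
    rw [PySem.Dict.contains_eq_isSome_get?, hv]; rfl
  have hsC : PySem.Chars.startswith l.toList ['S','p','e','a','k','e','r'] = true := by
    simpa using hs
  unfold pvStepA; simp [hsC, hsp, hc, hv, PySem.Dict.get?_insert_self]

lemma pvStepB_new (info : List String) (mem : PySem.Dict String String)
    (l sid text : String) (hs : PySem.Str.startswith l "Speaker" = true)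
    (hsp : PySem.Str.splitMax? l ":" 1 = some [sid, text])
    (hc : mem.contains sid = false) :
    pvStepB (info, mem) l =
      (info ++ [("Speaker " ++ PySem.Int.toStr ((mem.size : Int) + 1)) ++ ":" ++ PySem.Str.strip text],
       mem.insert sid ("Speaker " ++ PySem.Int.toStr ((mem.size : Int) + 1))) := by
  have hsC : PySem.Chars.startswith l.toList ['S','p','e','a','k','e','r'] = true := by
    simpa using hs
  unfold pvStepB; simp [hsC, hsp, hc, PySem.Dict.get?_insert_self]

lemma pvStepB_old (info : List String) (mem : PySem.Dict String String)
    (l sid text v : String) (hs : PySem.Str.startswith l "Speaker" = true)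
    (hsp : PySem.Str.splitMax? l ":" 1 = some [sid, text])
    (hv : mem.get? sid = some v) :
    pvStepB (info, mem) l = (info ++ [v ++ ":" ++ PySem.Str.strip text], mem) := by
  have hc : mem.contains sid = true := by
    rw [PySem.Dict.contains_eq_isSome_get?, hv]; rfl
  have hsC : PySem.Chars.startswith l.toList ['S','p','e','a','k','e','r'] = true := by
    simpa using hs
  unfold pvStepB; simp [hsC, hsp, hc, hv]

lemma pvRender_eq (cur : PySem.Dict String String) (l sid text v : String)
    (hsp : PySem.Str.splitMax? l ":" 1 = some [sid, text])
    (hv : cur.get? sid = some v) :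
    pvRender cur l = v ++ ":" ++ PySem.Str.strip text := by
  unfold pvRender pvKey pvText; rw [hsp]; simp [hv]

-- B's fold runs in lockstep with A's: same new_speaker_info and same speaker_memory,
-- whatever current_mapping A carries alongside.
lemma pv_lockstep (ls : List String) : ∀ (info : List String) (cur mem : PySem.Dict String String),
    (ls.foldl pvStepB (info, mem)).1 = (ls.foldl pvStepA (info, cur, mem)).1 ∧
    (ls.foldl pvStepB (info, mem)).2 = (ls.foldl pvStepA (info, cur, mem)).2.2 := by
  induction ls with
  | nil => intro info cur mem; exact ⟨rfl, rfl⟩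
  | cons l rest ih =>
    intro info cur mem
    simp only [List.foldl_cons]
    cases hs : PySem.Str.startswith l "Speaker" with
    | false =>
      rw [pvStepA_skip _ _ hs, pvStepB_skip _ _ hs]; exact ih info cur mem
    | true =>
      cases hsp : PySem.Str.splitMax? l ":" 1 with
      | none =>
        have hA : pvStepA (info, cur, mem) l = (info, cur, mem) := by
          unfold pvStepA; simp [(by simpa using hs : PySem.Chars.startswith l.toList ['S','p','e','a','k','e','r'] = true), hsp]
        have hB : pvStepB (info, mem) l = (info, mem) := by
          unfold pvStepB; simp [(by simpa using hs : PySem.Chars.startswith l.toList ['S','p','e','a','k','e','r'] = true), hsp]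
        rw [hA, hB]; exact ih info cur mem
      | some parts =>
        rcases parts with _ | ⟨sid, _ | ⟨text, _ | ⟨x, xs⟩⟩⟩
        · have hA : pvStepA (info, cur, mem) l = (info, cur, mem) := by
            unfold pvStepA; simp [(by simpa using hs : PySem.Chars.startswith l.toList ['S','p','e','a','k','e','r'] = true), hsp]
          have hB : pvStepB (info, mem) l = (info, mem) := by
            unfold pvStepB; simp [(by simpa using hs : PySem.Chars.startswith l.toList ['S','p','e','a','k','e','r'] = true), hsp]
          rw [hA, hB]; exact ih info cur mem
        · have hA : pvStepA (info, cur, mem) l = (info, cur, mem) := by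
            unfold pvStepA; simp [(by simpa using hs : PySem.Chars.startswith l.toList ['S','p','e','a','k','e','r'] = true), hsp]
          have hB : pvStepB (info, mem) l = (info, mem) := by
            unfold pvStepB; simp [(by simpa using hs : PySem.Chars.startswith l.toList ['S','p','e','a','k','e','r'] = true), hsp]
          rw [hA, hB]; exact ih info cur mem
        · cases hc : mem.contains sid with
          | false =>
            rw [pvStepA_new info cur mem l sid text hs hsp hc,
                pvStepB_new info mem l sid text hs hsp hc]
            exact ih _ _ _
          | true =>
            have hv : ∃ v, mem.get? sid = some v := by
              rw [PySem.Dict.contains_eq_isSome_get?] at hc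
              exact Option.isSome_iff_exists.mp hc
            obtain ⟨v, hv⟩ := hv
            rw [pvStepA_old info cur mem l sid text v hs hsp hv,
                pvStepB_old info mem l sid text v hs hsp hv]
            exact ih _ _ _
        · have hA : pvStepA (info, cur, mem) l = (info, cur, mem) := by
            unfold pvStepA; simp [(by simpa using hs : PySem.Chars.startswith l.toList ['S','p','e','a','k','e','r'] = true), hsp]
          have hB : pvStepB (info, mem) l = (info, mem) := by
            unfold pvStepB; simp [(by simpa using hs : PySem.Chars.startswith l.toList ['S','p','e','a','k','e','r'] = true), hsp]
          rw [hA, hB]; exact ih info cur mem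

-- The invariant of A's first loop: speaker_memory and current_mapping entries persist,
-- current_mapping ⊆ speaker_memory, and new_speaker_info equals the second-pass
-- comprehension rendered with the FINAL current_mapping (so A's .get fallback is dead code).
lemma pvA_inv (ls : List String)
    (hpre : ∀ l ∈ ls, PySem.Str.startswith l "Speaker" = true →
      ((PySem.Str.splitMax? l ":" 1).getD []).length = 2) :
    ∀ (info : List String) (cur mem : PySem.Dict String String),
    (∀ k v, cur.get? k = some v → mem.get? k = some v) →
    (∀ k v, mem.get? k = some v → (ls.foldl pvStepA (info, cur, mem)).2.2.get? k = some v) ∧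
    (∀ k v, cur.get? k = some v → (ls.foldl pvStepA (info, cur, mem)).2.1.get? k = some v) ∧
    (ls.foldl pvStepA (info, cur, mem)).1 =
      info ++ (ls.filter (fun l => PySem.Str.startswith l "Speaker")).map
        (pvRender (ls.foldl pvStepA (info, cur, mem)).2.1) := by
  induction ls with
  | nil => intro info cur mem _; exact ⟨fun _ _ h => h, fun _ _ h => h, by simp⟩
  | cons l rest ih =>
    intro info cur mem hsub
    have hpre' : ∀ l ∈ rest, PySem.Str.startswith l "Speaker" = true →
        ((PySem.Str.splitMax? l ":" 1).getD []).length = 2 :=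
      fun x hx => hpre x (List.mem_cons_of_mem _ hx)
    simp only [List.foldl_cons]
    cases hs : PySem.Str.startswith l "Speaker" with
    | false =>
      rw [pvStepA_skip _ _ hs]
      obtain ⟨P1, P2, P4⟩ := ih hpre' info cur mem hsub
      refine ⟨P1, P2, ?_⟩
      rw [P4]
      have hsC : PySem.Chars.startswith l.toList ['S','p','e','a','k','e','r'] = false := by
        simpa using hs
      simp [List.filter_cons, hsC]
    | true =>
      have hlen := hpre l (List.mem_cons_self) hs
      cases hsp : PySem.Str.splitMax? l ":" 1 with
      | none => rw [hsp] at hlen; simp at hlen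
      | some parts =>
        rw [hsp] at hlen
        rcases parts with _ | ⟨sid, _ | ⟨text, _ | ⟨x, xs⟩⟩⟩ <;> simp at hlen
        cases hc : mem.contains sid with
        | false =>
          have hnone : mem.get? sid = none := by
            rw [PySem.Dict.contains_eq_isSome_get?] at hc
            exact Option.not_isSome_iff_eq_none.mp (by simp [hc])
          rw [pvStepA_new info cur mem l sid text hs hsp hc]
          have hsub' : ∀ k v, (cur.insert sid ("Speaker " ++ PySem.Int.toStr ((mem.size : Int) + 1))).get? k = some v →
              (mem.insert sid ("Speaker " ++ PySem.Int.toStr ((mem.size : Int) + 1))).get? k = some v := by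
            intro k v hk
            by_cases hks : k = sid
            · subst hks
              rw [PySem.Dict.get?_insert_self] at hk
              rw [PySem.Dict.get?_insert_self]; exact hk
            · rw [PySem.Dict.get?_insert_of_ne _ _ hks] at hk
              rw [PySem.Dict.get?_insert_of_ne _ _ hks]; exact hsub k v hk
          obtain ⟨Q1, Q2, Q4⟩ := ih hpre' _ (cur.insert sid ("Speaker " ++ PySem.Int.toStr ((mem.size : Int) + 1))) (mem.insert sid ("Speaker " ++ PySem.Int.toStr ((mem.size : Int) + 1))) hsub'
          refine ⟨?_, ?_, ?_⟩
          · intro k v hk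
            by_cases hks : k = sid
            · subst hks; rw [hnone] at hk; cases hk
            · exact Q1 k v (by rw [PySem.Dict.get?_insert_of_ne _ _ hks]; exact hk)
          · intro k v hk
            by_cases hks : k = sid
            · have h1 := hsub k v hk
              rw [hks] at h1
              rw [hnone] at h1; cases h1
            · exact Q2 k v (by rw [PySem.Dict.get?_insert_of_ne _ _ hks]; exact hk)
          · rw [Q4]
            have hcurF : (rest.foldl pvStepA
                (info ++ [("Speaker " ++ PySem.Int.toStr ((mem.size : Int) + 1)) ++ ":" ++ PySem.Str.strip text], cur.insert sid ("Speaker " ++ PySem.Int.toStr ((mem.size : Int) + 1)),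
                  mem.insert sid ("Speaker " ++ PySem.Int.toStr ((mem.size : Int) + 1)))).2.1.get? sid = some ("Speaker " ++ PySem.Int.toStr ((mem.size : Int) + 1)) :=
              Q2 sid ("Speaker " ++ PySem.Int.toStr ((mem.size : Int) + 1)) (PySem.Dict.get?_insert_self _ _ _)
            rw [List.filter_cons, if_pos hs]
            simp only [List.map_cons]
            rw [pvRender_eq _ l sid text ("Speaker " ++ PySem.Int.toStr ((mem.size : Int) + 1)) hsp hcurF]
            simp
        | true =>
          have hv : ∃ v, mem.get? sid = some v := by
            rw [PySem.Dict.contains_eq_isSome_get?] at hc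
            exact Option.isSome_iff_exists.mp hc
          obtain ⟨v, hv⟩ := hv
          rw [pvStepA_old info cur mem l sid text v hs hsp hv]
          have hsub' : ∀ k v', (cur.insert sid v).get? k = some v' →
              mem.get? k = some v' := by
            intro k v' hk
            by_cases hks : k = sid
            · subst hks; rw [PySem.Dict.get?_insert_self] at hk
              rw [hv]; exact hk
            · rw [PySem.Dict.get?_insert_of_ne _ _ hks] at hk
              exact hsub k v' hk
          obtain ⟨Q1, Q2, Q4⟩ := ih hpre' _ (cur.insert sid v) mem hsub'
          refine ⟨Q1, ?_, ?_⟩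
          · intro k v' hk
            by_cases hks : k = sid
            · have h1 := hsub k v' hk
              rw [hks] at h1
              rw [hv] at h1
              obtain rfl := Option.some_inj.mp h1
              rw [hks]
              exact Q2 sid v (PySem.Dict.get?_insert_self _ _ _)
            · exact Q2 k v' (by rw [PySem.Dict.get?_insert_of_ne _ _ hks]; exact hk)
          · rw [Q4]
            have hcurF : (rest.foldl pvStepA
                (info ++ [v ++ ":" ++ PySem.Str.strip text], cur.insert sid v,
                  mem)).2.1.get? sid = some v :=
              Q2 sid v (PySem.Dict.get?_insert_self _ _ _)
            rw [List.filter_cons, if_pos hs]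
            simp only [List.map_cons]
            rw [pvRender_eq _ l sid text v hsp hcurF]
            simp

-- ===== VERDICT (by name: the statement is the Claim_ definition above) =====
theorem map_speakers_and_apply_mapping_spec : Claim_equal_map_speakers_and_apply_mapping := by
  unfold Claim_equal_map_speakers_and_apply_mapping
  intro g sm _hdom hpre
  unfold Spec_map_speakers_and_apply_mapping
  unfold map_speakers_and_apply_mapping map_speakers_and_apply_mapping_alt
  obtain ⟨_, _, P4⟩ := pvA_inv (PySem.Str.splitlines g) hpre [] PySem.Dict.empty
    (PySem.Dict.ofList sm) (fun k v h => by rw [PySem.Dict.get?_empty] at h; cases h)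
  obtain ⟨L1, L2⟩ := pv_lockstep (PySem.Str.splitlines g) [] PySem.Dict.empty
    (PySem.Dict.ofList sm)
  simp only [List.nil_append] at P4
  refine Prod.ext ?_ (Prod.ext ?_ ?_)
  · show PySem.Str.join "\n" _ = PySem.Str.join "\n" _
    rw [← P4, L1]
  · exact L1.symm
  · show _ = (PySem.Dict.items _)
    rw [L2]
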